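-- pv_equiv track=rewrite | github.com/farid1991/bpatch | bpatch.py | find
-- ===== SOURCE A (Python) =====
-- def check(data, what, a, s, count):
--     """
--     Check if a repeated pattern exists in the binary data.
--
--     :param data: Binary data to search
--     :param what: Byte to check for
--     :param a: Start index
--     :param s: Step size
--     :param count: Number of repetitions
--     :return: Length of the match (s * count) or 0 if no match
--     """
--     for i in range(count):
--         index = a + s * i
--         if index >= len(data) or data[index] != what:
--             return 0
--     return s * count
--
-- def find(data, what, paddr, count):
--     """
--     Find a repeated pattern in the binary data.
--
--     :param data: Binary data to search
--     :param what: Byte to check for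
--     :param paddr: Placeholder to store the start address (not used in this version)
--     :param count: Number of repetitions
--     :return: Tuple of start index and match length, or (0, 0) if not found
--     """
--     fs = len(data)
--
--     # Determine possible step sizes based on data length and repetition count
--     max_step = fs // count
--     possible_steps = range(2, max_step + 1, 2)  # Check every 2 bytes
--
--     for i in range(fs):
--         for step in possible_steps:
--             j = check(data, what, i, step, count)
--             if j > 0:
--                 return i, j  # Return the start index and match length
--
--     return 0, 0
-- ===== SOURCE B (Python) =====
-- def find(data, what, paddr, count):
--     fs = len(data)
--     max_step = fs // count
--     best = None  # (start, step): lexicographically minimal matching pair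
--     for s in range(2, max_step + 1, 2):
--         # run lengths along stride s, built back-to-front; run[-(fs - i)]
--         # is the number of consecutive in-bounds bytes equal to `what`
--         # starting at index i with stride s.
--         run = []
--         for i in range(fs - 1, -1, -1):
--             if data[i] == what:
--                 run.append(run[-s] + 1 if len(run) >= s else 1)
--             else:
--                 run.append(0)
--         first = None
--         for i in range(fs):
--             if run[fs - 1 - i] >= count:
--                 first = i
--                 break
--         if first is not None and (best is None or first < best[0]):
--             best = (first, s)
--     if best is None:
--         return 0, 0
--     return best[0], best[1] * count
-- ===== Notes on version B (the rewrite author's own statement) =====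
-- stated objective: faster
-- what changed: Instead of re-checking every (start,step) pair with an O(count) scan, B computes per step a backward run-length DP over the data (run[i] = consecutive stride-s matches starting at i), takes the first index with run >= count per step, and keeps the lexicographically smallest (start,step) pair.
-- outside the precondition, e.g. on find([1, 1], 1, 0, 0): A raises ZeroDivisionError, B raises ZeroDivisionError
import Mathlib
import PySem

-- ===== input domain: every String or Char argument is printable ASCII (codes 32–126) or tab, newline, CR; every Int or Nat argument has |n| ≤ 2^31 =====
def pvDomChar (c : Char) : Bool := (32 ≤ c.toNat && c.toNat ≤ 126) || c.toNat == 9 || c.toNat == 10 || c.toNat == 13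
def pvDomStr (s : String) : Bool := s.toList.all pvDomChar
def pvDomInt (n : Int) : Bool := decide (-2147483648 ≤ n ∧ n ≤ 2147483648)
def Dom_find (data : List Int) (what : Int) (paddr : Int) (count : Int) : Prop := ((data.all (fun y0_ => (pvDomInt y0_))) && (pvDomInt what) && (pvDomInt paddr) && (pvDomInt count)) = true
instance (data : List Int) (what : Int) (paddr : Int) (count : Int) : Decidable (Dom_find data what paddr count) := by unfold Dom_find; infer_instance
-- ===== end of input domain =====

-- B replaces A's per-(start,step) O(count) re-check by a per-step backward run-length
-- DP over the data; objective: faster (measured).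
-- ===== PORT A =====
-- check's loop over range(count) with early return 0
def checkGo (data : List Int) (what a s cnt : Int) : List Int → Int
  | [] => s * cnt
  | i :: rest =>
      let index := a + s * i
      -- `data[index]` : inside `find` the index is always ≥ 0, so pyGet? is exact here
      if index ≥ (data.length : Int) ∨ PySem.List.pyGet? data index ≠ some what then 0
      else checkGo data what a s cnt rest

def check (data : List Int) (what a s count : Int) : Int :=
  checkGo data what a s count (PySem.List.pyRange 0 count 1)

-- inner `for step in possible_steps` loop with early `return i, j`
def innerLoop (data : List Int) (what cnt a : Int) : List Int → Option Int
  | [] => none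
  | step :: rest =>
      let j := check data what a step cnt
      if j > 0 then some j else innerLoop data what cnt a rest

-- outer `for i in range(fs)` loop
def outerLoop (data : List Int) (what cnt : Int) (steps : List Int) : List Int → List Int
  | [] => [0, 0]
  | a :: rest =>
      match innerLoop data what cnt a steps with
      | some j => [a, j]
      | none => outerLoop data what cnt steps rest

def find (data : List Int) (what : Int) (paddr : Int) (count : Int) : List Int :=
  let fs : Int := (data.length : Int)
  let max_step := PySem.Int.floordiv fs count
  let possible_steps := PySem.List.pyRange 2 (max_step + 1) 2
  outerLoop data what count possible_steps (PySem.List.pyRange 0 fs 1)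

-- ===== PORT B =====
-- Source B builds `run` by appending for i = fs-1 .. 0 and reads run[-s];
-- here the same list is kept head-first (head = most recently appended value),
-- so python's run[-s] is pyGet? run (s-1) and python's run[fs-1-i] is run[i].
def runFold (data : List Int) (what s : Int) : List Int :=
  (PySem.List.pyRange ((data.length : Int) - 1) (-1) (-1)).foldl
    (fun run i =>
      (if PySem.List.pyGet? data i = some what then
        (if s ≤ (run.length : Int) then (PySem.List.pyGet? run (s - 1)).getD 0 + 1 else 1)
      else 0) :: run) []

-- `first = None; for i in range(fs): if run[..] >= count: first = i; break`
def firstHit (data : List Int) (count : Int) (run : List Int) : Option Nat :=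
  (List.range data.length).find? (fun i => decide (count ≤ run.getD i 0))

def find_alt (data : List Int) (what : Int) (paddr : Int) (count : Int) : List Int :=
  let fs : Int := (data.length : Int)
  let max_step := PySem.Int.floordiv fs count
  let steps := PySem.List.pyRange 2 (max_step + 1) 2
  let best : Option (Int × Int) := steps.foldl
    (fun best s =>
      match firstHit data count (runFold data what s) with
      | none => best
      | some i =>
        match best with
        | none => some ((i : Int), s)
        | some b => if (i : Int) < b.1 then some ((i : Int), s) else some b)
    none
  match best with
  | none => [0, 0]
  | some b => [b.1, b.2 * count]

-- ===== PRECONDITION & SPEC =====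
-- Pre_ excludes only count = 0, on which A raises ZeroDivisionError (fs // count).
def Pre_find (data : List Int) (what : Int) (paddr : Int) (count : Int) : Prop := count ≠ 0
instance (data : List Int) (what : Int) (paddr : Int) (count : Int) : Decidable (Pre_find data what paddr count) := by unfold Pre_find; infer_instance
def pvWitness_find : List Int × Int × Int × Int := ([7, 1, 7, 1, 7, 1], 7, 0, 3)

def Spec_find (data : List Int) (what : Int) (paddr : Int) (count : Int) (out : List Int) : Prop := out = find_alt data what paddr count
instance (data : List Int) (what : Int) (paddr : Int) (count : Int) (out : List Int) : Decidable (Spec_find data what paddr count out) := by unfold Spec_find; infer_instance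

-- ===== CLAIM (what is proved, stated in full; the proofs are below) =====
def Claim_equal_find : Prop := ∀ (data : List Int) (what : Int) (paddr : Int) (count : Int), Dom_find data what paddr count → Pre_find data what paddr count → Spec_find data what paddr count (find data what paddr count)

-- ===== LEMMAS AND PROOFS =====

-- spec-side match predicate: count consecutive stride-(st+1) bytes equal `what` from i
def goodb (data : List Int) (what : Int) (st i k : Nat) : Bool :=
  decide (i + (st + 1) * k < data.length) && decide (data[i + (st + 1) * k]? = some what)

def Mb (data : List Int) (what : Int) (c st i : Nat) : Bool :=
  (List.range c).all (goodb data what st i)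

-- backward run-length recurrence (stride st+1), the semantics of Source B's `run`
def runR (data : List Int) (what : Int) (st : Nat) (i : Nat) : Int :=
  if _h : i < data.length then
    (if data[i]? = some what then
      (if _h2 : i + st + 1 < data.length then runR data what st (i + st + 1) + 1 else 1)
    else 0)
  else 0
termination_by data.length - i
decreasing_by omega

theorem checkGo_eq (data : List Int) (what : Int) (i st : Nat) (cnt : Int) (ks : List Nat) :
    checkGo data what (i : Int) ((st + 1 : Nat) : Int) cnt (ks.map (Nat.cast : Nat → Int)) =
      if ks.all (goodb data what st i) then ((st + 1 : Nat) : Int) * cnt else 0 := by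
  induction ks with
  | nil => simp [checkGo]
  | cons k ks ih =>
    simp only [List.map_cons, checkGo, List.all_cons]
    have hidx : (i : Int) + ((st + 1 : Nat) : Int) * (k : Int) = ((i + (st + 1) * k : Nat) : Int) := by
      push_cast; ring
    rw [hidx, PySem.List.pyGet?_natCast]
    by_cases h1 : i + (st + 1) * k < data.length
    · by_cases h2 : data[i + (st + 1) * k]? = some what
      · have hc : ¬ (((i + (st + 1) * k : Nat) : Int) ≥ (data.length : Int) ∨
            data[i + (st + 1) * k]? ≠ some what) := by
          rw [not_or]
          constructor
          · rw [not_le]; exact_mod_cast h1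
          · rw [not_not]; exact h2
        rw [if_neg hc, ih]
        have hg : goodb data what st i k = true := by unfold goodb; rw [h2]; simp [h1]
        simp [hg]
      · rw [if_pos (Or.inr h2)]
        have hg : goodb data what st i k = false := by unfold goodb; simp [h2]
        simp [hg]
    · have hcl : (((i + (st + 1) * k : Nat) : Int) ≥ (data.length : Int)) := by
        exact_mod_cast Nat.le_of_not_lt h1
      rw [if_pos (Or.inl hcl)]
      have hg : goodb data what st i k = false := by unfold goodb; simp [h1]
      simp [hg]

theorem check_eq (data : List Int) (what : Int) (i st c : Nat) :
    check data what (i : Int) ((st + 1 : Nat) : Int) (c : Int) =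
      if Mb data what c st i then ((st + 1 : Nat) : Int) * (c : Int) else 0 := by
  have h := checkGo_eq data what i st (c : Int) (List.range c)
  unfold check
  rw [PySem.List.pyRange_zero_natCast]
  simp only [Mb]
  exact h

theorem innerLoop_eq (data : List Int) (what cnt a : Int) (S : List Int) :
    innerLoop data what cnt a S =
      (S.find? (fun s => decide (0 < check data what a s cnt))).map
        (fun s => check data what a s cnt) := by
  induction S with
  | nil => simp [innerLoop]
  | cons s S ih =>
    simp only [innerLoop, List.find?_cons]
    by_cases h : 0 < check data what a s cnt
    · simp [h]
    · rw [if_neg h, ih]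
      simp [h]

theorem outerLoop_eq (data : List Int) (what cnt : Int) (S : List Int) (I : List Int) :
    outerLoop data what cnt S I =
      match I.find? (fun a => (innerLoop data what cnt a S).isSome) with
      | none => [0, 0]
      | some a => match innerLoop data what cnt a S with
                  | some j => [a, j]
                  | none => [0, 0] := by
  induction I with
  | nil => simp [outerLoop]
  | cons a I ih =>
    simp only [outerLoop, List.find?_cons]
    rcases h : innerLoop data what cnt a S with _ | j
    · simpa [h] using ih
    · simp [h]

theorem firstIdx_eq_some (p : Nat → Bool) (n i : Nat) :
    (List.range n).find? p = some i ↔ i < n ∧ p i = true ∧ ∀ j < i, p j = false := by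
  induction n generalizing i with
  | zero => simp
  | succ n ih =>
    rw [List.range_succ, List.find?_append]
    rcases h : (List.range n).find? p with _ | k
    · have hn := List.find?_eq_none.mp h
      simp only [List.mem_range] at hn
      simp only [Option.none_or, List.find?_cons, List.find?_nil]
      constructor
      · intro he
        split at he
        · simp at he; subst he
          exact ⟨by omega, by assumption, fun j hj => by simpa using hn j hj⟩
        · simp at he
      · rintro ⟨h1, h2, h3⟩
        have : i = n := by
          by_contra hne
          have hlt : i < n := by omega
          have := hn i hlt
          simp [h2] at this
        subst this
        simp [h2]
    · simp only [Option.some_or]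
      rw [ih] at h
      constructor
      · intro he
        have : k = i := by simpa using he
        subst this
        exact ⟨by omega, h.2.1, h.2.2⟩
      · rintro ⟨h1, h2, h3⟩
        rcases h with ⟨hk1, hk2, hk3⟩
        have : i = k := by
          rcases Nat.lt_trichotomy i k with h' | h' | h'
          · exact absurd h2 (by simp [hk3 i h'])
          · exact h'
          · exact absurd hk2 (by simp [h3 k h'])
        simp [this]

theorem runR_nonneg (data : List Int) (what : Int) (st i : Nat) : 0 ≤ runR data what st i := by
  fun_induction runR
  all_goals first | omega | simp

theorem Mb_succ (data : List Int) (what : Int) (c st i : Nat) :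
    Mb data what (c + 1) st i =
      (goodb data what st i 0 && Mb data what c st (i + st + 1)) := by
  simp only [Mb, List.range_succ_eq_map, List.all_cons, List.all_map]
  have hfun : (goodb data what st i ∘ Nat.succ) = goodb data what st (i + st + 1) := by
    funext k
    have h : i + (st + 1) * (k + 1) = (i + st + 1) + (st + 1) * k := by ring
    simp [goodb, Function.comp, h]
  rw [hfun]

theorem goodb_zero (data : List Int) (what : Int) (st i : Nat) :
    goodb data what st i 0 =
      (decide (i < data.length) && decide (data[i]? = some what)) := by
  unfold goodb
  have h : i + (st + 1) * 0 = i := by ring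
  rw [h]

theorem runR_ge_iff (data : List Int) (what : Int) (st : Nat) (c i : Nat) :
    ((c : Int) ≤ runR data what st i) ↔ Mb data what c st i = true := by
  induction c generalizing i with
  | zero => simpa [Mb] using runR_nonneg data what st i
  | succ c ih =>
    rw [Mb_succ, goodb_zero, runR]
    by_cases h1 : i < data.length
    · by_cases h2 : data[i]? = some what
      · rw [dif_pos h1, if_pos h2, h2]
        simp only [decide_true, h1, Bool.and_true, Bool.true_and, decide_eq_true_eq]
        by_cases h3 : i + st + 1 < data.length
        · rw [dif_pos h3]
          rw [← ih (i + st + 1)]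
          constructor
          · intro h; push_cast at h ⊢; omega
          · intro h; push_cast at h ⊢; omega
        · rw [dif_neg h3]
          cases c with
          | zero => simp [Mb]
          | succ c' =>
            rw [Mb_succ, goodb_zero]
            have hd : decide (i + st + 1 < data.length) = false := by simp [h3]
            rw [hd]
            simp only [Bool.false_and, Bool.and_false]
            constructor
            · intro h; exfalso; push_cast at h; omega
            · intro h; exact absurd h (by simp)
      · rw [dif_pos h1, if_neg h2]
        have hd : decide (data[i]? = some what) = false := by simp [h2]
        rw [hd]
        simp only [Bool.and_false, Bool.false_and]
        constructor
        · intro h; exfalso; push_cast at h; omega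
        · intro h; exact absurd h (by simp)
    · rw [dif_neg h1]
      have hd : decide (i < data.length) = false := by simp [h1]
      rw [hd]
      simp only [Bool.false_and]
      constructor
      · intro h; exfalso; push_cast at h; omega
      · intro h; exact absurd h (by simp)

theorem backRange (n : Nat) :
    PySem.List.pyRange ((n : Int) - 1) (-1) (-1) =
      (List.range n).map (fun k : Nat => ((n : Int) - 1 - (k : Int))) := by
  rw [PySem.List.pyRange]
  rw [if_neg (by norm_num : ¬ (-1 : Int) = 0)]
  rw [if_neg (by norm_num : ¬ (0 : Int) < -1)]
  rcases Nat.eq_zero_or_pos n with h | h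
  · subst h
    rw [if_neg (by norm_num)]
    simp
  · rw [if_pos (by omega : (-1 : Int) < (n : Int) - 1)]
    have hc : ((n : Int) - 1 - -1 + - -1 - 1) / - -1 = (n : Int) := by norm_num
    rw [hc, Int.toNat_natCast]
    apply List.map_congr_left
    intro k _
    ring

theorem runFold_inv (data : List Int) (what : Int) (st : Nat) :
    ∀ m, m ≤ data.length →
      ((List.range m).map (fun k : Nat => ((data.length : Int) - 1 - (k : Int)))).foldl
        (fun run i =>
          (if PySem.List.pyGet? data i = some what then
            (if ((st + 1 : Nat) : Int) ≤ (run.length : Int) then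
              (PySem.List.pyGet? run (((st + 1 : Nat) : Int) - 1)).getD 0 + 1 else 1)
          else 0) :: run) [] =
      (List.range' (data.length - m) m).map (runR data what st) := by
  intro m
  induction m with
  | zero => simp
  | succ m ih =>
    intro hm
    rw [List.range_succ, List.map_append, List.foldl_append, ih (by omega)]
    simp only [List.map_cons, List.map_nil, List.foldl_cons, List.foldl_nil]
    have hi : (data.length : Int) - 1 - (m : Int) = ((data.length - 1 - m : Nat) : Int) := by omega
    rw [hi, PySem.List.pyGet?_natCast]
    have hlen : ((List.range' (data.length - m) m).map (runR data what st)).length = m := by simp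
    have hs1 : ((st + 1 : Nat) : Int) - 1 = ((st : Nat) : Int) := by push_cast; ring
    rw [hs1, PySem.List.pyGet?_natCast]
    have hr : List.range' (data.length - (m + 1)) (m + 1) =
        (data.length - 1 - m) :: List.range' (data.length - m) m := by
      have h1 : data.length - (m + 1) = data.length - 1 - m := by omega
      have h2 : data.length - 1 - m + 1 = data.length - m := by omega
      rw [List.range'_succ, h1, h2]
    rw [hr, List.map_cons]
    congr 1
    rw [runR]
    have hlt : data.length - 1 - m < data.length := by omega
    rw [dif_pos hlt]
    by_cases h2 : data[data.length - 1 - m]? = some what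
    · rw [if_pos h2, if_pos h2]
      have hidx : data.length - 1 - m + st + 1 = data.length - m + st := by omega
      by_cases h3 : st + 1 ≤ m
      · have hcond : ((st + 1 : Nat) : Int) ≤
            ((((List.range' (data.length - m) m).map (runR data what st)).length : Nat) : Int) := by
          rw [hlen]; exact_mod_cast h3
        rw [if_pos hcond, dif_pos (by omega : data.length - 1 - m + st + 1 < data.length)]
        have hget : ((List.range' (data.length - m) m).map (runR data what st))[st]? =
            some (runR data what st (data.length - m + st)) := by
          rw [List.getElem?_map, List.getElem?_range']
          all_goals first | omega | simp
        rw [hget]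
        simp [hidx]
      · have hcond : ¬ ((st + 1 : Nat) : Int) ≤
            ((((List.range' (data.length - m) m).map (runR data what st)).length : Nat) : Int) := by
          rw [hlen]; exact_mod_cast h3
        rw [if_neg hcond, dif_neg (by omega : ¬ data.length - 1 - m + st + 1 < data.length)]
    · rw [if_neg h2, if_neg h2]

theorem runFold_eq (data : List Int) (what : Int) (st : Nat) :
    runFold data what ((st + 1 : Nat) : Int) = (List.range data.length).map (runR data what st) := by
  unfold runFold
  rw [backRange]
  have h := runFold_inv data what st data.length (le_refl _)
  simp only [Nat.sub_self] at h
  rw [h, List.range'_eq_map_range]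
  simp

theorem first_congr_mem (l : List Nat) (p q : Nat → Bool) (h : ∀ x ∈ l, p x = q x) :
    l.find? p = l.find? q := by
  induction l with
  | nil => rfl
  | cons x l ih =>
    simp only [List.find?_cons]
    rw [h x (by simp)]
    rcases hq : q x with _ | _
    · simp only [hq]
      exact ih (fun y hy => h y (by simp [hy]))
    · simp [hq]

theorem firstHit_eq (data : List Int) (what : Int) (st c : Nat) :
    firstHit data (c : Int) (runFold data what ((st + 1 : Nat) : Int)) =
      (List.range data.length).find? (Mb data what c st) := by
  unfold firstHit
  rw [runFold_eq]
  apply first_congr_mem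
  intro i hi
  rw [List.mem_range] at hi
  have hget : ((List.range data.length).map (runR data what st)).getD i 0 = runR data what st i := by
    rw [List.getD_eq_getElem?_getD, List.getElem?_map, List.getElem?_range hi]
    simp
  rw [hget]
  by_cases h : (c : Int) ≤ runR data what st i
  · have hm := (runR_ge_iff data what st c i).mp h
    simp [h, hm]
  · have hm : Mb data what c st i = false := by
      rcases Bool.eq_false_or_eq_true (Mb data what c st i) with h' | h'
      · exact absurd ((runR_ge_iff data what st c i).mpr h') h
      · exact h'
    simp [h, hm]

theorem steps_empty (n : Nat) (count : Int) (h : count < 0) :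
    PySem.List.pyRange 2 (PySem.Int.floordiv (n : Int) count + 1) 2 = [] := by
  have hq : PySem.Int.floordiv (n : Int) count ≤ 0 := by
    by_contra hq
    push_neg at hq
    have hdm := PySem.Int.floordiv_mul_add_mod (n : Int) count
    have hb := PySem.Int.mod_neg_bounds (a := (n : Int)) h
    have h1 : PySem.Int.floordiv (n : Int) count * count ≤ 1 * count := by
      apply mul_le_mul_of_nonpos_right (by omega) (by omega)
    have : (0 : Int) ≤ (n : Int) := Int.natCast_nonneg n
    omega
  rw [PySem.List.pyRange_of_pos 2 _ (by norm_num)]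
  rw [if_neg (by omega)]
  simp

theorem outerLoop_nil_steps (data : List Int) (what cnt : Int) (I : List Int) :
    outerLoop data what cnt [] I = [0, 0] := by
  induction I with
  | nil => rfl
  | cons a I ih => simpa [outerLoop, innerLoop] using ih

def bstep (f : Int → Option Nat) : Option (Int × Int) → Int → Option (Int × Int) :=
  fun best s => match f s with
  | none => best
  | some i => match best with
    | none => some ((i : Int), s)
    | some b => if (i : Int) < b.1 then some ((i : Int), s) else some b

theorem bfold_shift (f : Int → Option Nat) :
    ∀ (S : List Int) (b : Int × Int),
      S.foldl (bstep f) (some b) =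
        match S.foldl (bstep f) none with
        | none => some b
        | some cd => if cd.1 < b.1 then some cd else some b := by
  intro S
  induction S with
  | nil => intro b; rfl
  | cons s S ih =>
    intro b
    simp only [List.foldl_cons]
    rcases hf : f s with _ | i
    · simp only [bstep, hf]
      exact ih b
    · simp only [bstep, hf]
      by_cases hib : (i : Int) < b.1
      · rw [if_pos hib, ih ((i : Int), s)]
        rcases h0 : S.foldl (bstep f) none with _ | cd <;> dsimp only <;> split_ifs
        all_goals first
        | rfl
        | omega
        | (simp_all
           try omega)
      · rw [if_neg hib, ih b, ih ((i : Int), s)]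
        rcases h0 : S.foldl (bstep f) none with _ | cd <;> dsimp only <;> split_ifs
        all_goals first
        | rfl
        | omega
        | (simp_all
           try omega)

theorem bfold_main (n : Nat) (P : Nat → Int → Bool) (f : Int → Option Nat) :
    ∀ S : List Int,
      (∀ s ∈ S, f s = (List.range n).find? (fun i => P i s)) →
      (match S.foldl (bstep f) none with
       | none => (List.range n).find? (fun i => (S.find? (fun s => P i s)).isSome) = none
       | some cd => ∃ i : Nat, cd.1 = (i : Int) ∧
           (List.range n).find? (fun i => (S.find? (fun s => P i s)).isSome) = some i ∧
           S.find? (fun s => P i s) = some cd.2) := by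
  intro S
  induction S with
  | nil =>
    intro _
    simp
  | cons s S ih =>
    intro hS
    have hs2 := hS s (by simp)
    have hSrest : ∀ s' ∈ S, f s' = (List.range n).find? (fun i => P i s') :=
      fun s' hs' => hS s' (by simp [hs'])
    have ihr := ih hSrest
    simp only [List.foldl_cons]
    rcases hf : f s with _ | i0
    · -- s never matches: drop it everywhere
      have hnone : ∀ i < n, P i s = false := by
        intro i hi
        have := List.find?_eq_none.mp (hs2.symm.trans hf) i (by simp [hi])
        simpa using this
      have hcongr : (List.range n).find? (fun i => ((s :: S).find? (fun t => P i t)).isSome) =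
          (List.range n).find? (fun i => (S.find? (fun t => P i t)).isSome) := by
        apply first_congr_mem
        intro i hi
        rw [List.mem_range] at hi
        rw [List.find?_cons, hnone i hi]
      simp only [bstep, hf]
      rw [hcongr]
      rcases h0 : S.foldl (bstep f) none with _ | cd
      · rw [h0] at ihr; exact ihr
      · rw [h0] at ihr
        obtain ⟨i, hi1, hi2, hi3⟩ := ihr
        refine ⟨i, hi1, hi2, ?_⟩
        have hin : i < n := by
          have := (firstIdx_eq_some _ n i).mp hi2
          exact this.1
        rw [List.find?_cons, hnone i hin]
        exact hi3
    · -- s matches first at i0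
      have hfind := (firstIdx_eq_some (fun i => P i s) n i0).mp (hs2.symm.trans hf)
      obtain ⟨hi0n, hPi0, hmin0⟩ := hfind
      simp only [bstep, hf]
      rw [bfold_shift]
      rcases h0 : S.foldl (bstep f) none with _ | cd
      · -- no other step matches anywhere
        rw [h0] at ihr
        dsimp only
        have hnoS : ∀ i < n, (S.find? (fun t => P i t)) = none := by
          intro i hi
          have := List.find?_eq_none.mp ihr i (by simp [hi])
          simpa using this
        refine ⟨i0, rfl, ?_, ?_⟩
        · rw [firstIdx_eq_some]
          refine ⟨hi0n, ?_, ?_⟩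
          · simp [List.find?_cons, hPi0]
          · intro j hj
            rw [List.find?_cons, hmin0 j hj, hnoS j (by omega)]
            simp
        · rw [List.find?_cons, hPi0]
      · rw [h0] at ihr
        dsimp only
        obtain ⟨i1, hcd1, hfind1, hinner1⟩ := ihr
        have h1 := (firstIdx_eq_some _ n i1).mp hfind1
        obtain ⟨hi1n, hsome1, hmin1⟩ := h1
        have hnoSj : ∀ j < i1, S.find? (fun t => P j t) = none := by
          intro j hj
          have := hmin1 j hj
          simpa using this
        by_cases hlt : cd.1 < (i0 : Int)
        · rw [if_pos hlt]
          dsimp only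
          have hi1i0 : i1 < i0 := by rw [hcd1] at hlt; exact_mod_cast hlt
          refine ⟨i1, hcd1, ?_, ?_⟩
          · rw [firstIdx_eq_some]
            refine ⟨hi1n, ?_, ?_⟩
            · rw [List.find?_cons]
              rcases hps : P i1 s with _ | _
              · simpa using hsome1
              · simp
            · intro j hj
              rw [List.find?_cons, hmin0 j (by omega), hnoSj j hj]
              simp
          · rw [List.find?_cons]
            have hPi1s : P i1 s = false := by
              rcases hb : P i1 s with _ | _
              · rfl
              · exact absurd hb (by simp [hmin0 i1 hi1i0])
            rw [hPi1s]
            exact hinner1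
        · rw [if_neg hlt]
          dsimp only
          have hi0i1 : i0 ≤ i1 := by
            rw [hcd1] at hlt; exact_mod_cast not_lt.mp hlt
          refine ⟨i0, rfl, ?_, ?_⟩
          · rw [firstIdx_eq_some]
            refine ⟨hi0n, ?_, ?_⟩
            · simp [List.find?_cons, hPi0]
            · intro j hj
              rw [List.find?_cons, hmin0 j hj, hnoSj j (by omega)]
              simp
          · rw [List.find?_cons, hPi0]

theorem main_pos_eq (data : List Int) (what paddr : Int) (c : Nat) (hc : 0 < c) :
    find data what paddr (c : Int) = find_alt data what paddr (c : Int) := by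
  set n := data.length with hn'
  set S := PySem.List.pyRange 2 (PySem.Int.floordiv (n : Int) (c : Int) + 1) 2 with hS
  have hS2 : ∀ s ∈ S, 2 ≤ s := by
    intro s hs
    rw [hS] at hs
    exact ((PySem.List.mem_pyRange_iff_of_pos (by norm_num) s).mp hs).1
  set P : Nat → Int → Bool := fun i s => decide (0 < check data what (i : Int) s (c : Int)) with hP
  set f : Int → Option Nat := fun s => firstHit data (c : Int) (runFold data what s) with hf
  have hcheck : ∀ s, 2 ≤ s → ∀ i : Nat, check data what (i : Int) s (c : Int) =
      if Mb data what c (s.toNat - 1) i then s * (c : Int) else 0 := by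
    intro s h2 i
    obtain ⟨st, hst⟩ : ∃ st : Nat, s = ((st + 1 : Nat) : Int) := ⟨s.toNat - 1, by omega⟩
    have hstt : s.toNat - 1 = st := by omega
    rw [hstt, hst, check_eq]
  have hlink : ∀ s ∈ S, f s = (List.range n).find? (fun i => P i s) := by
    intro s hs
    have h2 := hS2 s hs
    obtain ⟨st, hst⟩ : ∃ st : Nat, s = ((st + 1 : Nat) : Int) := ⟨s.toNat - 1, by omega⟩
    subst hst
    rw [hf]
    dsimp only
    rw [firstHit_eq]
    apply first_congr_mem
    intro i hi
    rw [hP]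
    dsimp only
    rw [check_eq]
    by_cases hm : Mb data what c st i = true
    · rw [if_pos hm, hm]
      have hpos : (0 : Int) < ((st + 1 : Nat) : Int) * (c : Int) := by
        have := Nat.mul_pos (Nat.succ_pos st) hc
        exact_mod_cast this
      simp [hpos, hc]
    · have hm' : Mb data what c st i = false := by simpa using hm
      rw [if_neg hm, hm']
      simp
  have hmain := bfold_main n P f S hlink
  have hB : find_alt data what paddr (c : Int) =
      (match S.foldl (bstep f) none with
       | none => [0, 0]
       | some b => [b.1, b.2 * (c : Int)]) := by
    rfl
  have hpred : ((fun a => (innerLoop data what (c : Int) a S).isSome) ∘ (Nat.cast : Nat → Int)) =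
      fun i : Nat => (S.find? (fun s => P i s)).isSome := by
    funext i
    simp only [Function.comp, innerLoop_eq, Option.isSome_map, hP]
  have hA : find data what paddr (c : Int) =
      (match (List.range n).find? (fun i => (S.find? (fun s => P i s)).isSome) with
       | none => [0, 0]
       | some i => match S.find? (fun s => P i s) with
                   | some s => [(i : Int), check data what (i : Int) s (c : Int)]
                   | none => [0, 0]) := by
    simp only [find]
    rw [outerLoop_eq, PySem.List.pyRange_zero_natCast n, List.find?_map, hpred]
    rcases hfound : (List.range n).find? (fun i => (S.find? (fun s => P i s)).isSome) with _ | i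
    · rfl
    · simp only [Option.map_some]
      rw [innerLoop_eq]
      rcases hinner : S.find? (fun s => P i s) with _ | s
      · rfl
      · rfl
  rw [hA, hB]
  rcases hres : S.foldl (bstep f) none with _ | cd
  · rw [hres] at hmain
    rw [hmain]
  · rw [hres] at hmain
    obtain ⟨i, hcd1, hfind, hinner⟩ := hmain
    rw [hfind]
    dsimp only
    rw [hinner]
    dsimp only
    rw [hcd1]
    have hsS : cd.2 ∈ S := List.mem_of_find?_eq_some hinner
    have hPt : P i cd.2 = true := List.find?_some hinner
    have h2 := hS2 cd.2 hsS
    have hckpos : 0 < check data what (i : Int) cd.2 (c : Int) := by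
      rw [hP] at hPt
      simpa using hPt
    have hck := hcheck cd.2 h2 i
    have hMb : Mb data what c (cd.2.toNat - 1) i = true := by
      rcases Bool.eq_false_or_eq_true (Mb data what c (cd.2.toNat - 1) i) with hb | hb
      · exact hb
      · rw [hck, hb] at hckpos
        simp at hckpos
    rw [hck, hMb] at hckpos ⊢
    simp

-- ===== VERDICT (by name: the statement is the Claim_ definition above) =====
theorem find_spec : Claim_equal_find := by
  unfold Claim_equal_find Spec_find Pre_find
  intro data what paddr count _hdom hpre
  rcases lt_trichotomy count 0 with hneg | hzero | hpos
  · have hempty := steps_empty data.length count hneg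
    simp only [find, find_alt]
    rw [hempty, outerLoop_nil_steps]
    rfl
  · exact absurd hzero hpre
  · obtain ⟨c, rfl⟩ : ∃ c : Nat, count = (c : Int) :=
      ⟨count.toNat, (Int.toNat_of_nonneg (le_of_lt hpos)).symm⟩
    have hc : 0 < c := by exact_mod_cast hpos
    exact main_pos_eq data what paddr c hc
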